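-- pv_equiv track=rewrite | github.com/pranamya55/immunefi-smart-contract-mega-repo-by-program | mega-repo/assets/github/repos/alpenlabs/strata-bridge/scripts/orphan_check.py | is_valid_assignee_format
-- ===== SOURCE A (Python) =====
-- def is_valid_assignee_format(remainder: str, slug: str) -> bool:
--     expected_prefix = f"{slug}: ("
--     if not remainder.startswith(expected_prefix):
--         return False
--
--     assignee_and_description = remainder[len(expected_prefix) :]
--     assignee, separator, description = assignee_and_description.partition(")")
--     if separator == "":
--         return False
--
--     if not assignee or any(ch.isspace() for ch in assignee):
--         return False
--
--     if not description.startswith(" "):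
--         return False
--
--     return bool(description.strip())
-- ===== SOURCE B (Python) =====
-- def is_valid_assignee_format(remainder: str, slug: str) -> bool:
--     # Single left-to-right state machine over remainder; no slicing/partition passes.
--     pending = slug + ": ("   # prefix characters still to match
--     state = 0  # 0 prefix, 1 assignee first char, 2 assignee rest, 3 need ' ', 4 need non-space
--     for ch in remainder:
--         if state == 0:
--             if ch != pending[0]:
--                 return False
--             pending = pending[1:]
--             if not pending:
--                 state = 1
--         elif state == 1:
--             if ch == ')' or ch.isspace():
--                 return False
--             state = 2
--         elif state == 2:
--             if ch == ')':
--                 state = 3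
--             elif ch.isspace():
--                 return False
--         elif state == 3:
--             if ch != ' ':
--                 return False
--             state = 4
--         else:  # state == 4: description body, succeed at first non-space
--             if not ch.isspace():
--                 return True
--     return False
-- ===== Notes on version B (the rewrite author's own statement) =====
-- stated objective: alternative
-- what changed: A's startswith + slice + partition(')') + any() + strip() multi-pass parse is replaced by a single left-to-right five-state machine over the characters of remainder, so no intermediate substrings are built.
import Mathlib
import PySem

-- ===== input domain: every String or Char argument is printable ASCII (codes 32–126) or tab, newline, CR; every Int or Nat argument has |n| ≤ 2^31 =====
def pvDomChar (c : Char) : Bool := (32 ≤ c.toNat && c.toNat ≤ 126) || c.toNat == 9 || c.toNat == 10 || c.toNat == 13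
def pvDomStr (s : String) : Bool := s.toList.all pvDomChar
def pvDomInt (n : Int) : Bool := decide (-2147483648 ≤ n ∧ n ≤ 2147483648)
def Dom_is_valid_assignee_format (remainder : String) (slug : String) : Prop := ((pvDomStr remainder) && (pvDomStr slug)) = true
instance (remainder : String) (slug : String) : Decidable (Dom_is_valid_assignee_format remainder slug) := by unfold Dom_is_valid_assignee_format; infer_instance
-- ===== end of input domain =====

-- B replaces A's startswith/slice/partition/any/strip passes by a single left-to-right
-- state machine over the characters of `remainder` (objective: alternative single pass).

-- ===== PORT A =====
-- hand port of str.partition(")") on char lists: (before, found-separator?, after); exact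
def partParen : List Char → List Char × Bool × List Char
  | [] => ([], false, [])
  | c :: rest =>
    if c = ')' then ([], true, rest)
    else
      let r := partParen rest
      (c :: r.1, r.2.1, r.2.2)

def is_valid_assignee_format (remainder : String) (slug : String) : Bool :=
  let expected_prefix := slug ++ ": ("
  if ¬ PySem.Str.startswith remainder expected_prefix then false
  else
    -- remainder[len(expected_prefix):]
    let aad := PySem.Chars.slice remainder.toList (some (expected_prefix.toList.length : Int)) none
    match partParen aad with
    | (assignee, separator, description) =>
      if separator = false then false
      else if assignee.isEmpty || assignee.any PySem.Chars.isspace then false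
      else if ¬ PySem.Chars.startswith description [' '] then false
      else !(PySem.Chars.strip description).isEmpty

-- ===== PORT B =====
-- state machine of Source B: state 0 = still matching `pending` prefix chars, 1 = first
-- assignee char, 2 = rest of assignee, 3 = need the ' ' after ')', 4 = need a non-space
def altGo : List Char → List Char → Nat → Bool
  | [], _, _ => false
  | ch :: rest, pending, st =>
    if st = 0 then
      match pending with
      | [] => false   -- unreachable: state 0 always carries a nonempty pending prefix
      | p :: ps => if ch ≠ p then false
                   else if ps.isEmpty then altGo rest [] 1 else altGo rest ps 0
    else if st = 1 then
      if ch = ')' || PySem.Chars.isspace ch then false else altGo rest pending 2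
    else if st = 2 then
      if ch = ')' then altGo rest pending 3
      else if PySem.Chars.isspace ch then false
      else altGo rest pending 2
    else if st = 3 then
      if ch ≠ ' ' then false else altGo rest pending 4
    else
      if ¬ PySem.Chars.isspace ch then true else altGo rest pending 4

def is_valid_assignee_format_alt (remainder : String) (slug : String) : Bool :=
  altGo remainder.toList (slug ++ ": (").toList 0

-- ===== PRECONDITION & SPEC =====
def Spec_is_valid_assignee_format (remainder : String) (slug : String) (out : Bool) : Prop := out = is_valid_assignee_format_alt remainder slug
instance (remainder : String) (slug : String) (out : Bool) : Decidable (Spec_is_valid_assignee_format remainder slug out) := by unfold Spec_is_valid_assignee_format; infer_instance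

-- ===== CLAIM (what is proved, stated in full; the proofs are below) =====
def Claim_equal_is_valid_assignee_format : Prop := ∀ (remainder : String) (slug : String), Dom_is_valid_assignee_format remainder slug → Spec_is_valid_assignee_format remainder slug (is_valid_assignee_format remainder slug)

-- ===== LEMMAS AND PROOFS =====

lemma altGo_state4 (cs p : List Char) :
    altGo cs p 4 = cs.any (fun c => !PySem.Chars.isspace c) := by
  induction cs with
  | nil => rfl
  | cons c rest ih =>
    simp only [altGo, List.any_cons]
    by_cases h : PySem.Chars.isspace c <;> simp [h, ih]

lemma strip_isEmpty (d : List Char) :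
    (PySem.Chars.strip d).isEmpty = d.all PySem.Chars.isspace := by
  rw [Bool.eq_iff_iff]
  simp only [PySem.Chars.strip, PySem.Chars.lstrip, PySem.Chars.rstrip,
    List.isEmpty_iff, List.reverse_eq_nil_iff, List.dropWhile_eq_nil_iff,
    List.mem_reverse, List.all_eq_true]
  constructor
  · intro h x hx
    have hx' : x ∈ d.takeWhile PySem.Chars.isspace ∨ x ∈ d.dropWhile PySem.Chars.isspace := by
      rw [← List.mem_append, List.takeWhile_append_dropWhile]; exact hx
    rcases hx' with h1 | h2
    · exact List.mem_takeWhile_imp h1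
    · exact h x h2
  · intro h x hx
    exact h x ((List.dropWhile_sublist (l := d) (p := PySem.Chars.isspace)).mem hx)

lemma notStrip_any (d : List Char) :
    (!(PySem.Chars.strip d).isEmpty) = d.any (fun c => !PySem.Chars.isspace c) := by
  rw [strip_isEmpty]
  induction d with
  | nil => rfl
  | cons c rest ih => by_cases h : PySem.Chars.isspace c <;> simp [h, ih]

lemma altGo_state3 (d p : List Char) :
    altGo d p 3 =
      (PySem.Chars.startswith d [' '] && d.any (fun c => !PySem.Chars.isspace c)) := by
  cases d with
  | nil => rfl
  | cons c r =>
    simp only [altGo, PySem.Chars.startswith]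
    by_cases h : c = ' '
    · subst h
      have hsp : PySem.Chars.isspace ' ' = true := by decide
      simp [altGo_state4, List.isPrefixOf, hsp]
    · simp [List.isPrefixOf, h, Ne.symm h]

lemma altGo_state2 (cs p : List Char) :
    altGo cs p 2 =
      ((partParen cs).2.1 && !(partParen cs).1.any PySem.Chars.isspace
        && altGo (partParen cs).2.2 p 3) := by
  induction cs with
  | nil => rfl
  | cons c rest ih =>
    by_cases h : c = ')'
    · subst h; simp [altGo, partParen]
    · by_cases hs : PySem.Chars.isspace c
      · simp [altGo, partParen, h, hs]
      · simp [altGo, partParen, h, hs, ih]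

lemma altGo_state1 (cs p : List Char) :
    altGo cs p 1 =
      (match partParen cs with
       | (assignee, separator, description) =>
         if separator = false then false
         else if assignee.isEmpty || assignee.any PySem.Chars.isspace then false
         else if ¬ PySem.Chars.startswith description [' '] then false
         else !(PySem.Chars.strip description).isEmpty) := by
  cases cs with
  | nil => rfl
  | cons c rest =>
    rcases hp : partParen rest with ⟨a, f, d⟩
    by_cases h : c = ')'
    · subst h; simp [altGo, partParen]
    · have hpc : partParen (c :: rest) = (c :: a, f, d) := by
        simp [partParen, h, hp]
      rw [hpc]
      by_cases hs : PySem.Chars.isspace c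
      · have hL : altGo (c :: rest) p 1 = false := by simp [altGo, h, hs]
        rw [hL]
        cases f
        · simp
        · simp [hs]
      · have hL : altGo (c :: rest) p 1 = altGo rest p 2 := by simp [altGo, h, hs]
        rw [hL, altGo_state2, hp]
        cases f
        · simp
        · simp only [Bool.true_and]
          by_cases hA : a.any PySem.Chars.isspace
          · simp [hA]
          · simp only [altGo_state3, notStrip_any]
            simp only [hA]
            by_cases hS : PySem.Chars.startswith d [' '] <;> simp [hS, hA, hs]

lemma altGo_state0 (pfx : List Char) (hne : pfx ≠ []) (cs : List Char) :
    altGo cs pfx 0 =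
      (if pfx.isPrefixOf cs then altGo (cs.drop pfx.length) [] 1 else false) := by
  induction pfx generalizing cs with
  | nil => exact absurd rfl hne
  | cons p ps ih =>
    cases cs with
    | nil => simp [altGo, List.isPrefixOf]
    | cons c rest =>
      by_cases h : c = p
      · subst h
        cases hps : ps with
        | nil => simp [altGo, List.isPrefixOf]
        | cons q qs =>
          have hih := ih (by simp [hps]) rest
          rw [hps] at hih
          simp [altGo, List.isPrefixOf, hih]
      · have h' : ¬ (p = c) := fun hh => h hh.symm
        simp [altGo, List.isPrefixOf, h, h']

-- ===== VERDICT (by name: the statement is the Claim_ definition above) =====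
theorem is_valid_assignee_format_spec : Claim_equal_is_valid_assignee_format := by
  intro remainder slug _
  simp only [Spec_is_valid_assignee_format, is_valid_assignee_format, is_valid_assignee_format_alt]
  have hne : (slug ++ ": (").toList ≠ [] := by
    simp [String.toList_append]
  rw [altGo_state0 _ hne]
  have hslice : PySem.Chars.slice remainder.toList (some ((slug ++ ": (").toList.length : Int)) none
      = remainder.toList.drop (slug ++ ": (").toList.length := by
    rw [PySem.Chars.slice_eq_listSlice, PySem.List.slice_from_natCast]
  by_cases hpre : ((slug ++ ": (").toList.isPrefixOf remainder.toList) = true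
  · have h : PySem.Str.startswith remainder (slug ++ ": (") = true := hpre
    rw [if_neg (not_not_intro h), if_pos hpre, hslice]
    exact (altGo_state1 _ _).symm
  · have h : ¬ PySem.Str.startswith remainder (slug ++ ": (") = true := hpre
    rw [if_pos h, if_neg hpre]
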